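-- pv_equiv track=rewrite | github.com/Gabrielsvc/PU2_IA | neuralnetwork.py | trata_generos
-- ===== SOURCE A (Python) =====
-- def trata_generos(lista_generos):
-- 	byte = [0,0,0,0,0,0,0,0]
-- 	if ("Acao" in lista_generos):
-- 		byte[0] = 1
-- 	if ("Aventura" in lista_generos):
-- 		byte[1] = 1
-- 	if ("Comedia" in lista_generos):
-- 		byte[2] = 1
-- 	if ("Romance" in lista_generos):
-- 		byte[3] = 1
-- 	if ("Terror" in lista_generos):
-- 		byte[4] = 1
-- 	if ("Suspense" in lista_generos):
-- 		byte[5] = 1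
-- 	if ("Animacao" in lista_generos):
-- 		byte[6] = 1
-- 	if ("Drama" in lista_generos):
-- 		byte[7] = 1
-- 	byte =int(''.join(str(e) for e in byte),2)
-- 	return byte
-- ===== SOURCE B (Python) =====
-- GENRE_WEIGHTS = [
--     ("Acao", 128), ("Aventura", 64), ("Comedia", 32), ("Romance", 16),
--     ("Terror", 8), ("Suspense", 4), ("Animacao", 2), ("Drama", 1),
-- ]
--
-- def trata_generos(lista_generos):
--     result = 0
--     for name, weight in GENRE_WEIGHTS:
--         if name in lista_generos:
--             result += weight
--     return result
-- ===== Notes on version B (the rewrite author's own statement) =====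
-- stated objective: simpler
-- what changed: Replaces the eight unrolled branches that build a bit list and parse it via int(''.join(...), 2) with a single data-driven loop over a (genre, power-of-two weight) table that accumulates the integer arithmetically.
import Mathlib
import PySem

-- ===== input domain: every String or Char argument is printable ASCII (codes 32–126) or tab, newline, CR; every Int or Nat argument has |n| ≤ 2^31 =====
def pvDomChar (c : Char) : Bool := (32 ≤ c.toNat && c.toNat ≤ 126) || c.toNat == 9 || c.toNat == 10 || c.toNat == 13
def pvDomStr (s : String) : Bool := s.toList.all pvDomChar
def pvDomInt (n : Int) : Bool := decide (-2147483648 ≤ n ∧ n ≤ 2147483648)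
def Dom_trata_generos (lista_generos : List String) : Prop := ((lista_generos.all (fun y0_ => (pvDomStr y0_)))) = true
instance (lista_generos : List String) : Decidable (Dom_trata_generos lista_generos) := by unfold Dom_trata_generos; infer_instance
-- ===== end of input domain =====

-- B replaces the bit-list + int(''.join(...), 2) string round-trip by arithmetic
-- accumulation over a (genre, weight) table — simpler, same cost.

-- ===== PORT A =====
-- literal transliteration: build the 8-slot bit list, set slots by membership,
-- join str(e) of each entry and parse the string in base 2.
-- int(s, 2) never raises here (s is eight '0'/'1' chars), so .getD 0 is unreachable.
def trata_generos (lista_generos : List String) : Int :=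
  let byte : List Int := [0,0,0,0,0,0,0,0]
  let byte := if lista_generos.contains "Acao" then byte.set 0 1 else byte
  let byte := if lista_generos.contains "Aventura" then byte.set 1 1 else byte
  let byte := if lista_generos.contains "Comedia" then byte.set 2 1 else byte
  let byte := if lista_generos.contains "Romance" then byte.set 3 1 else byte
  let byte := if lista_generos.contains "Terror" then byte.set 4 1 else byte
  let byte := if lista_generos.contains "Suspense" then byte.set 5 1 else byte
  let byte := if lista_generos.contains "Animacao" then byte.set 6 1 else byte
  let byte := if lista_generos.contains "Drama" then byte.set 7 1 else byte
  (PySem.Int.ofStrBase? (PySem.Str.join "" (byte.map (fun e => PySem.Int.toStr e))) 2).getD 0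

-- ===== PORT B =====
def genreWeights : List (String × Int) :=
  [("Acao", 128), ("Aventura", 64), ("Comedia", 32), ("Romance", 16),
   ("Terror", 8), ("Suspense", 4), ("Animacao", 2), ("Drama", 1)]

def trata_generos_alt (lista_generos : List String) : Int :=
  genreWeights.foldl (fun result p =>
    if lista_generos.contains p.1 then result + p.2 else result) 0

-- ===== PRECONDITION & SPEC =====
def Spec_trata_generos (lista_generos : List String) (out : Int) : Prop := out = trata_generos_alt lista_generos
instance (lista_generos : List String) (out : Int) : Decidable (Spec_trata_generos lista_generos out) := by unfold Spec_trata_generos; infer_instance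

-- ===== CLAIM (what is proved, stated in full; the proofs are below) =====
def Claim_equal_trata_generos : Prop := ∀ (lista_generos : List String), Dom_trata_generos lista_generos → Spec_trata_generos lista_generos (trata_generos lista_generos)

-- ===== LEMMAS AND PROOFS =====

-- ===== VERDICT (by name: the statement is the Claim_ definition above) =====
theorem trata_generos_spec : Claim_equal_trata_generos := by
  intro l _
  unfold Spec_trata_generos trata_generos trata_generos_alt genreWeights
  simp only [List.foldl]
  generalize l.contains "Acao" = b1
  generalize l.contains "Aventura" = b2
  generalize l.contains "Comedia" = b3
  generalize l.contains "Romance" = b4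
  generalize l.contains "Terror" = b5
  generalize l.contains "Suspense" = b6
  generalize l.contains "Animacao" = b7
  generalize l.contains "Drama" = b8
  revert b1 b2 b3 b4 b5 b6 b7 b8
  decide
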